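-- pv_equiv track=rewrite | github.com/steffenmaus/aoc2019_python | day25/day25.py | out_as_text
-- ===== SOURCE A (Python) =====
-- def out_as_text(out):
--     lines = []
--     line = ''
--     for o in out:
--         match o:
--             case 10:
--                 lines.append(line)
--                 line = ''
--             case _:
--                 line = line + chr(o)
--     return lines
-- ===== SOURCE B (Python) =====
-- def out_as_text(out):
--     text = ''.join(chr(o) for o in out)
--     return text.split('\n')[:-1]
-- ===== Notes on version B (the rewrite author's own statement) =====
-- stated objective: idiomatic
-- what changed: The per-character stateful loop with its newline branch is replaced by one join building the whole text followed by str.split('\n'), dropping the final element to discard the trailing partial line that A never appends.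
-- outside the precondition, e.g. on out_as_text([55296]): A returns [], B returns []
import Mathlib
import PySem

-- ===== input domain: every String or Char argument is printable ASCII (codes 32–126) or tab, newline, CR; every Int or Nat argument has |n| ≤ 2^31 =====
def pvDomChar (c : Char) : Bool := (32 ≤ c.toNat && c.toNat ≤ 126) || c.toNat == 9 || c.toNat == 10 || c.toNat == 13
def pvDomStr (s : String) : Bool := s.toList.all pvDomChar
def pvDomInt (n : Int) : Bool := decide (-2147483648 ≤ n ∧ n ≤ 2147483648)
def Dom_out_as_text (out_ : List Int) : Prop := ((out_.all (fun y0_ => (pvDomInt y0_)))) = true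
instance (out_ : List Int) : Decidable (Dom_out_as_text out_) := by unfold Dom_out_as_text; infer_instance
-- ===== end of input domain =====

-- B replaces A's per-character accumulator loop by one join building the whole text,
-- then a library split on '\n' dropping the trailing partial line (idiomatic).

-- chr(o): strings are modelled as List Char, a character as Char (shared by both ports)
def pyChr (o : Int) : Char := Char.ofNat o.toNat

-- ===== PORT A =====
-- A's loop: state = (lines so far, current line); on 10 flush the line, else append the char.
def out_as_text (out_ : List Int) : List String :=
  let st := out_.foldl
    (fun (st : List (List Char) × List Char) o =>
      if o = 10 then (st.1 ++ [st.2], ([] : List Char))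
      else (st.1, st.2 ++ [pyChr o]))
    (([], []) : List (List Char) × List Char)
  st.1.map String.ofList

-- ===== PORT B =====
-- Source B: text = ''.join(chr(o) for o in out); return text.split('\n')[:-1]
def out_as_text_alt (out_ : List Int) : List String :=
  let text : List Char := out_.map pyChr
  PySem.List.slice ((text.splitOn '\n').map String.ofList) none (some (-1))

-- ===== PRECONDITION & SPEC =====
-- Pre_ excludes code points on which Python's chr raises ValueError (negative or > 0x10FFFF)
-- and the surrogate code points 0xD800–0xDFFF, where A returns lone-surrogate strings that
-- have no counterpart in Lean's String type (B returns the same strings there).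
def Pre_out_as_text (out_ : List Int) : Prop :=
  ∀ o ∈ out_, 0 ≤ o ∧ o ≤ 1114111 ∧ (o < 55296 ∨ 57343 < o)
instance (out_ : List Int) : Decidable (Pre_out_as_text out_) := by
  unfold Pre_out_as_text; infer_instance

def pvWitness_out_as_text : List Int := [72, 105, 10, 33]

def Spec_out_as_text (out_ : List Int) (out : List String) : Prop := out = out_as_text_alt out_
instance (out_ : List Int) (out : List String) : Decidable (Spec_out_as_text out_ out) := by
  unfold Spec_out_as_text; infer_instance

-- ===== CLAIM (what is proved, stated in full; the proofs are below) =====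
def Claim_equal_out_as_text : Prop :=
  ∀ (out_ : List Int), Dom_out_as_text out_ → Pre_out_as_text out_ →
    Spec_out_as_text out_ (out_as_text out_)

-- ===== LEMMAS AND PROOFS =====

theorem pyChr_eq_newline_iff (o : Int) : pyChr o = '\n' ↔ o = 10 := by
  unfold pyChr
  constructor
  · intro h
    by_cases hv : o.toNat.isValidChar
    · have h10 : o.toNat = 10 := by
        have ht := congrArg Char.toNat h
        rw [Char.ofNat, dif_pos hv] at ht
        simpa [Char.ofNatAux, Char.toNat] using ht
      omega
    · exfalso
      rw [Char.ofNat, dif_neg hv] at h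
      exact absurd (congrArg Char.toNat h) (by decide)
  · rintro rfl; decide

theorem splitOnP_ne_nil' (p : Char → Bool) (cs : List Char) : cs.splitOnP p ≠ [] := by
  induction cs with
  | nil => simp [List.splitOnP_nil]
  | cons c cs ih =>
    rw [List.splitOnP_cons]
    split_ifs
    · simp
    · cases h : cs.splitOnP p with
      | nil => exact absurd h ih
      | cons a t => simp

theorem foldA_eq (cs : List Char) (L : List (List Char)) (l : List Char) :
    cs.foldl
      (fun (st : List (List Char) × List Char) c =>
        if c = '\n' then (st.1 ++ [st.2], ([] : List Char))
        else (st.1, st.2 ++ [c])) (L, l)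
    = (L ++ ((cs.splitOnP (· == '\n')).modifyHead (l ++ ·)).dropLast,
       ((cs.splitOnP (· == '\n')).modifyHead (l ++ ·)).getLastD []) := by
  induction cs generalizing L l with
  | nil => simp [List.splitOnP_nil]
  | cons c cs ih =>
    rw [List.foldl_cons, List.splitOnP_cons]
    by_cases hc : c = '\n'
    · have hne := splitOnP_ne_nil' (· == '\n') cs
      cases h : cs.splitOnP (· == '\n') with
      | nil => exact absurd h hne
      | cons a t =>
        simp only [hc, beq_self_eq_true]
        rw [ih]
        simp [h, List.dropLast_cons_of_ne_nil]
    · have hb : (c == '\n') = false := by simp [hc]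
      simp only [if_neg hc, hb, Bool.false_eq_true, if_false]
      rw [ih]
      cases h : cs.splitOnP (· == '\n') with
      | nil => exact absurd h (splitOnP_ne_nil' _ cs)
      | cons a t => simp

-- ===== VERDICT (by name: the statement is the Claim_ definition above) =====
theorem out_as_text_spec : Claim_equal_out_as_text := by
  intro out_ _ _
  unfold Spec_out_as_text out_as_text out_as_text_alt
  have hmap : ∀ (xs : List Int) (st : List (List Char) × List Char),
      xs.foldl
        (fun (st : List (List Char) × List Char) o =>
          if o = 10 then (st.1 ++ [st.2], ([] : List Char))
          else (st.1, st.2 ++ [pyChr o])) st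
      = (xs.map pyChr).foldl
        (fun (st : List (List Char) × List Char) c =>
          if c = '\n' then (st.1 ++ [st.2], ([] : List Char))
          else (st.1, st.2 ++ [c])) st := by
    intro xs
    induction xs with
    | nil => intro st; rfl
    | cons x xs ih =>
      intro st
      simp only [List.foldl_cons, List.map_cons]
      rw [ih]
      congr 1
      by_cases hx : x = 10
      · simp [hx, pyChr_eq_newline_iff]
      · simp [hx, (pyChr_eq_newline_iff x).not]
  rw [hmap, foldA_eq]
  cases h : (out_.map pyChr).splitOnP (· == '\n') with
  | nil => exact absurd h (splitOnP_ne_nil' _ _)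
  | cons a t =>
    simp [List.splitOn, h, PySem.List.slice_to_neg_one]
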